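-- pv_equiv track=rewrite | github.com/EchoForger/BrewGUI | src/brewgui/app.py | parse_brew_info
-- ===== SOURCE A (Python) =====
-- def parse_brew_info(raw: str):
--     lines = raw.splitlines()
--     summary = []
--     sections = {}
--     current = None
--
--     for line in lines:
--         if line.startswith("==>"):
--             title = line.replace("==>", "").strip()
--             current = title if title else "Other"
--             sections.setdefault(current, [])
--         else:
--             if current is None:
--                 if line.strip():
--                     summary.append(line)
--             else:
--                 sections[current].append(line)
--
--     return summary, sections
-- ===== SOURCE B (Python) =====
-- def parse_brew_info(raw: str):
--     # Phase 1: split the lines into the leading block and one block per "==>" header.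
--     head = []
--     blocks = []  # (header_line, body_lines) per "==>" header, in order
--     for line in raw.splitlines():
--         if line.startswith("==>"):
--             blocks.append((line, []))
--         elif blocks:
--             blocks[-1][1].append(line)
--         else:
--             head.append(line)
--     # Phase 2: assemble summary and sections from the blocks.
--     summary = [l for l in head if l.strip()]
--     sections = {}
--     for header, body in blocks:
--         title = header.replace("==>", "").strip() or "Other"
--         sections.setdefault(title, []).extend(body)
--     return summary, sections
-- ===== Notes on version B (the rewrite author's own statement) =====
-- stated objective: alternative
-- what changed: Replaced the single-pass state machine with a current-section pointer by a two-phase decomposition: first split the lines into the leading block and one raw block per '==>' header, then filter the leading block into the summary and assemble the sections dict from the blocks with setdefault+extend.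
import Mathlib
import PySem

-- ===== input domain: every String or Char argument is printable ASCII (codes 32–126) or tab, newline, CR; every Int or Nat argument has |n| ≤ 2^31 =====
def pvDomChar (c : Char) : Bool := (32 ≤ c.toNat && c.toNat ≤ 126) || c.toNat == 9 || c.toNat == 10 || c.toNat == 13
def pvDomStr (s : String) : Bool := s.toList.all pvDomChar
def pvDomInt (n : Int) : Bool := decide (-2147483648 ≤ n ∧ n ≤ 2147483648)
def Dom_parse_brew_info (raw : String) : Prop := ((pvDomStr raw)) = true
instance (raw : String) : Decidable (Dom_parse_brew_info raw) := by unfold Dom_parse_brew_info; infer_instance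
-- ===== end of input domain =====

-- B replaces A's one-pass state machine by a split-into-blocks pass followed by an assembly pass (alternative decomposition, same cost).

-- ===== PORT A =====
-- one step of A's for-loop; state = (summary, sections, current)
def pbiStepA (st : List String × PySem.Dict String (List String) × Option String)
    (line : String) : List String × PySem.Dict String (List String) × Option String :=
  if PySem.Str.startswith line "==>" then
    let title := PySem.Str.strip (PySem.Str.replace line "==>" "")
    let current := if title = "" then "Other" else title
    (st.1, st.2.1.setdefault current [], some current)
  else
    match st.2.2 with
    | none => if PySem.Str.strip line ≠ "" then (st.1 ++ [line], st.2.1, none) else st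
    | some c =>
        -- `sections[current].append(line)`: current is always a key here (setdefault ran), so modify is exact
        (st.1, st.2.1.modify c [] (fun v => v ++ [line]), some c)

def parse_brew_info (raw : String) : List String × (List (String × List String)) :=
  let st := (PySem.Str.splitlines raw).foldl pbiStepA ([], PySem.Dict.empty, none)
  (st.1, st.2.1.items)

-- ===== PORT B =====
-- phase 1 step: route a line to the head block or append it to the last header block
def pbiSplitStep (st : List String × List (String × List String)) (line : String) :
    List String × List (String × List String) :=
  if PySem.Str.startswith line "==>" then
    (st.1, st.2 ++ [(line, [])])
  else
    match st.2.getLast? with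
    | some last => (st.1, st.2.dropLast ++ [(last.1, last.2 ++ [line])])
    | none => (st.1 ++ [line], st.2)

def pbiTitleB (header : String) : String :=
  let t := PySem.Str.strip (PySem.Str.replace header "==>" "")
  if t = "" then "Other" else t

-- phase 2: `sections.setdefault(title, []).extend(body)` over the blocks
def pbiBuild (blocks : List (String × List String)) : PySem.Dict String (List String) :=
  blocks.foldl (fun d blk =>
    (d.setdefault (pbiTitleB blk.1) []).modify (pbiTitleB blk.1) [] (fun v => v ++ blk.2))
    PySem.Dict.empty

def parse_brew_info_alt (raw : String) : List String × (List (String × List String)) :=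
  let st := (PySem.Str.splitlines raw).foldl pbiSplitStep ([], [])
  (st.1.filter (fun l => PySem.Str.strip l != ""), (pbiBuild st.2).items)

-- ===== PRECONDITION & SPEC =====
def Spec_parse_brew_info (raw : String) (out : List String × (List (String × List String))) : Prop := out = parse_brew_info_alt raw
instance (raw : String) (out : List String × (List (String × List String))) : Decidable (Spec_parse_brew_info raw out) := by unfold Spec_parse_brew_info; infer_instance

-- ===== CLAIM (what is proved, stated in full; the proofs are below) =====
def Claim_equal_parse_brew_info : Prop := ∀ (raw : String), Dom_parse_brew_info raw → Spec_parse_brew_info raw (parse_brew_info raw)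

-- ===== LEMMAS AND PROOFS =====

-- the A-state determined by B's phase-1 state (head, blocks)
def pbiState (h : List String) (bs : List (String × List String)) :
    List String × PySem.Dict String (List String) × Option String :=
  (h.filter (fun l => PySem.Str.strip l != ""), pbiBuild bs, (bs.getLast?).map (fun p => pbiTitleB p.1))

-- inserting the value already stored at an existing key is the identity
lemma pbi_insert_getD_self (d : PySem.Dict String (List String)) (k : String) (d0 : List String)
    (hc : d.contains k = true) (hnd : d.keys.Nodup) : d.insert k (d.getD k d0) = d := by
  apply PySem.Dict.ext
  rw [PySem.Dict.items_insert_of_contains _ _ hc]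
  have : ∀ p ∈ d.items, (if p.1 == k then (k, d.getD k d0) else p) = p := by
    intro p hp
    by_cases hk : p.1 = k
    · subst hk
      have := PySem.Dict.getD_of_mem_items _ hp hnd d0
      simp [this]
    · simp [hk]
  rw [List.map_congr_left this, List.map_id']

lemma pbi_modify_modify (d : PySem.Dict String (List String)) (k : String) (d0 : List String)
    (f g : List String → List String) :
    (d.modify k d0 f).modify k d0 g = d.modify k d0 (fun v => g (f v)) := by
  simp [PySem.Dict.modify, PySem.Dict.getD_insert_self, PySem.Dict.insert_insert_self]

lemma pbi_build_concat (bs : List (String × List String)) (blk : String × List String) :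
    pbiBuild (bs ++ [blk]) =
      ((pbiBuild bs).setdefault (pbiTitleB blk.1) []).modify (pbiTitleB blk.1) [] (fun v => v ++ blk.2) := by
  simp [pbiBuild]

lemma pbi_nodup_setdefault (d : PySem.Dict String (List String)) (k : String) (v : List String)
    (hnd : d.keys.Nodup) : (d.setdefault k v).keys.Nodup := by
  by_cases hc : d.contains k = true
  · rw [PySem.Dict.setdefault_of_contains _ _ hc]; exact hnd
  · rw [PySem.Dict.setdefault_of_not_contains _ _ (by simpa using hc)]
    exact PySem.Dict.nodup_keys_insert _ _ _ hnd

lemma pbi_build_nodup (bs : List (String × List String)) : (pbiBuild bs).keys.Nodup := by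
  induction bs using List.reverseRecOn with
  | nil => simp [pbiBuild, PySem.Dict.keys_empty]
  | append_singleton bs blk ih =>
      rw [pbi_build_concat]
      exact PySem.Dict.nodup_keys_insert _ _ _ (pbi_nodup_setdefault _ _ _ ih)

-- one line: A's step on the state determined by (h, bs) is the state determined by B's step
lemma pbi_step (h : List String) (bs : List (String × List String)) (l : String) :
    pbiStepA (pbiState h bs) l = pbiState (pbiSplitStep (h, bs) l).1 (pbiSplitStep (h, bs) l).2 := by
  by_cases hdr : PySem.Str.startswith l "==>" = true
  · -- header line
    have hset : ((pbiBuild bs).setdefault (pbiTitleB l) []).contains (pbiTitleB l) = true := by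
      simp [PySem.Dict.contains_setdefault]
    have hnd : ((pbiBuild bs).setdefault (pbiTitleB l) []).keys.Nodup :=
      pbi_nodup_setdefault _ _ _ (pbi_build_nodup bs)
    simp only [pbiStepA, pbiSplitStep, hdr, if_pos, pbiState, pbi_build_concat]
    refine Prod.ext rfl (Prod.ext ?_ ?_)
    · show (pbiBuild bs).setdefault _ [] =
        ((pbiBuild bs).setdefault (pbiTitleB l) []).modify (pbiTitleB l) [] (fun v => v ++ [])
      have : (fun v : List String => v ++ ([] : List String)) = fun v => v := by
        funext v; simp
      rw [this]
      show _ = ((pbiBuild bs).setdefault (pbiTitleB l) []).insert (pbiTitleB l)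
        (((pbiBuild bs).setdefault (pbiTitleB l) []).getD (pbiTitleB l) [])
      rw [pbi_insert_getD_self _ _ _ hset hnd]
      rfl
    · simp [pbiTitleB]
  · -- non-header line
    rcases List.eq_nil_or_concat bs with hbs | ⟨bs', blk, hbs⟩
    · subst hbs
      simp only [pbiStepA, pbiSplitStep, hdr, pbiState, List.getLast?_nil, Option.map_none]
      by_cases hs : PySem.Str.strip l = ""
      · simp [hs, List.filter_append]
      · simp [hs, List.filter_append]
    · subst hbs
      simp only [List.concat_eq_append] at *
      simp only [pbiStepA, pbiSplitStep, hdr, pbiState, Bool.false_eq_true, if_false,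
        List.getLast?_concat, Option.map_some, List.dropLast_concat]
      refine Prod.ext rfl (Prod.ext ?_ ?_)
      · show (pbiBuild (bs' ++ [blk])).modify (pbiTitleB blk.1) [] (fun v => v ++ [l]) =
          pbiBuild (bs' ++ [(blk.1, blk.2 ++ [l])])
        rw [pbi_build_concat, pbi_build_concat, pbi_modify_modify]
        simp
      · simp

lemma pbi_inv (lines : List String) (h : List String) (bs : List (String × List String)) :
    lines.foldl pbiStepA (pbiState h bs) =
      pbiState (lines.foldl pbiSplitStep (h, bs)).1 (lines.foldl pbiSplitStep (h, bs)).2 := by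
  induction lines generalizing h bs with
  | nil => rfl
  | cons l ls ih =>
      simp only [List.foldl_cons]
      rw [pbi_step h bs l, ih]

-- ===== VERDICT (by name: the statement is the Claim_ definition above) =====
theorem parse_brew_info_spec : Claim_equal_parse_brew_info := by
  intro raw _
  unfold Spec_parse_brew_info parse_brew_info parse_brew_info_alt
  have h0 : (([], PySem.Dict.empty, none) :
      List String × PySem.Dict String (List String) × Option String) = pbiState [] [] := rfl
  rw [h0, pbi_inv]
  rfl
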